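-- pv_equiv track=rewrite | github.com/parasiitism/AlgoDaily | interviews/jpmorgan/reverse-string-in-group/main.py | f
-- ===== SOURCE A (Python) =====
-- def f(S, K):
--     res = ""
--     cur = ""
--     for i in range(len(S)):
--         c = S[i]
--         cur += c
--         if len(cur) == K:
--             res += cur[::-1]
--             cur = ""
--     if len(cur) > 0:
--         res += cur
--     return res
-- ===== SOURCE B (Python) =====
-- def f(S, K):
--     if K <= 0:
--         return S
--     parts = []
--     for i in range(0, len(S), K):
--         chunk = S[i:i+K]
--         parts.append(chunk[::-1] if len(chunk) == K else chunk)
--     return "".join(parts)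
-- ===== Notes on version B (the rewrite author's own statement) =====
-- stated objective: idiomatic
-- what changed: B iterates over S in K-sized slices, reversing each full chunk and joining once, instead of A's per-character accumulation into a running group buffer with repeated string concatenation; for K <= 0 (where no group ever completes) B returns S directly.
import Mathlib
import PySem

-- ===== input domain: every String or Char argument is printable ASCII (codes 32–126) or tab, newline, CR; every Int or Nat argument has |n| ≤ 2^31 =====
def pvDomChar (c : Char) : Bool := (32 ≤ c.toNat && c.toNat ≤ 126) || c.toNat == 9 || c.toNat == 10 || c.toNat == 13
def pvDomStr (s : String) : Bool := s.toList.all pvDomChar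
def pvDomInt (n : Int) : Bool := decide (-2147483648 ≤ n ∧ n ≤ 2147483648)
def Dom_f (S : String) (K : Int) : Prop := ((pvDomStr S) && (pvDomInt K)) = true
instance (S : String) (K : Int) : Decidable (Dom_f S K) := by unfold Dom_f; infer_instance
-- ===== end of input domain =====

-- B replaces A's per-character accumulation into a running group buffer by iterating over
-- S in K-sized slices, reversing each full chunk, and joining once (idiomatic; same cost).

-- ===== PORT A =====
-- one loop step: cur += c; if len(cur) == K: res += cur[::-1]; cur = ""
def fStep (K : Int) (st : List Char × List Char) (c : Char) : List Char × List Char :=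
  let cur := st.2 ++ [c]
  if (cur.length : Int) = K then (st.1 ++ cur.reverse, []) else (st.1, cur)

-- the trailing "if len(cur) > 0: res += cur; return res"
def fFin (p : List Char × List Char) : List Char :=
  if p.2.length > 0 then p.1 ++ p.2 else p.1

def f (S : String) (K : Int) : String :=
  String.ofList (fFin (S.toList.foldl (fStep K) ([], [])))

-- ===== PORT B =====
-- the chunk loop "for i in range(0, len(S), K)": consume K = k+1 chars per step
-- (k is K-1 so that the recursion terminates for every Nat argument)
def fAltGo (k : Nat) (l : List Char) : List Char :=
  if l = [] then []
  else
    let chunk := l.take (k + 1)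
    if chunk.length = k + 1 then chunk.reverse ++ fAltGo k (l.drop (k + 1))
    else chunk
termination_by l.length
decreasing_by
  rename_i h _
  have : l.length ≠ 0 := fun h0 => h (List.eq_nil_of_length_eq_zero h0)
  simp [List.length_drop]; omega

def f_alt (S : String) (K : Int) : String :=
  if K ≤ 0 then S else String.ofList (fAltGo (K.toNat - 1) S.toList)

-- ===== PRECONDITION & SPEC =====
def Spec_f (S : String) (K : Int) (out : String) : Prop := out = f_alt S K
instance (S : String) (K : Int) (out : String) : Decidable (Spec_f S K out) := by unfold Spec_f; infer_instance

-- ===== CLAIM (what is proved, stated in full; the proofs are below) =====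
def Claim_equal_f : Prop := ∀ (S : String) (K : Int), Dom_f S K → Spec_f S K (f S K)

-- ===== LEMMAS AND PROOFS =====

-- A's step with the group-size test rewritten over Nat (equal to fStep K for 1 ≤ K)
def fStepN (k : Nat) (st : List Char × List Char) (c : Char) : List Char × List Char :=
  let cur := st.2 ++ [c]
  if cur.length = k + 1 then (st.1 ++ cur.reverse, []) else (st.1, cur)

theorem fStep_eq_fStepN (K : Int) (hK : 1 ≤ K) : fStep K = fStepN (K.toNat - 1) := by
  funext st c
  simp only [fStep, fStepN]
  have h : ((st.2 ++ [c]).length : Int) = K ↔ (st.2 ++ [c]).length = K.toNat - 1 + 1 := by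
    omega
  split_ifs with h1 h2 h2 <;> simp_all

-- K ≤ 0: the group never completes, the fold only appends to cur
theorem fold_noop (K : Int) (hK : K ≤ 0) :
    ∀ (l : List Char) (res cur : List Char),
      l.foldl (fStep K) (res, cur) = (res, cur ++ l) := by
  intro l
  induction l with
  | nil => intro res cur; simp
  | cons c t ih =>
      intro res cur
      have hcond : ¬ ((cur.length : Int) + 1 = K) := by omega
      simp [List.foldl_cons, fStep, hcond, ih]

-- the accumulated res is a pure prefix of the fold's result
theorem fold_res (k : Nat) :
    ∀ (l : List Char) (res cur : List Char),
      l.foldl (fStepN k) (res, cur)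
        = (res ++ (l.foldl (fStepN k) ([], cur)).1, (l.foldl (fStepN k) ([], cur)).2) := by
  intro l
  induction l with
  | nil => intro res cur; simp
  | cons c t ih =>
      intro res cur
      simp only [List.foldl_cons, fStepN]
      split_ifs with h
      · simp only [List.nil_append]
        rw [ih (res ++ (cur ++ [c]).reverse) [], ih ((cur ++ [c]).reverse) []]
        simp
      · exact ih res (cur ++ [c])

theorem fFin_append (res : List Char) (p : List Char × List Char) :
    fFin (res ++ p.1, p.2) = res ++ fFin p := by
  simp only [fFin]
  split_ifs <;> simp

theorem fold_go (k : Nat) :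
    ∀ (l cur : List Char), cur.length < k + 1 →
      fFin (l.foldl (fStepN k) ([], cur)) = fAltGo k (cur ++ l) := by
  intro l
  induction l with
  | nil =>
      intro cur hcur
      rcases cur with _ | ⟨c, cs⟩
      · simp [fFin, fAltGo]
      · rw [fAltGo]
        have hne : (c :: cs : List Char) ≠ [] := by simp
        have htake : (c :: cs : List Char).take (k + 1) = c :: cs :=
          List.take_of_length_le (by omega)
        simp only [List.foldl_nil, List.append_nil, fFin, hne, if_false, htake]
        have h2 : cs.length ≠ k := by
          simp only [List.length_cons] at hcur; omega
        simp [h2]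
  | cons c t ih =>
      intro cur hcur
      simp only [List.foldl_cons, fStepN]
      split_ifs with h
      · -- group completes: cur ++ [c] has length k+1
        simp only [List.nil_append]
        rw [fold_res k t ((cur ++ [c]).reverse) [], fFin_append]
        rw [ih [] (by simp)]
        have hassoc : cur ++ c :: t = (cur ++ [c]) ++ t := by simp
        rw [hassoc]
        conv_rhs => rw [fAltGo]
        have hne : (cur ++ [c]) ++ t ≠ [] := by simp
        have hlen : (cur ++ [c]).length = k + 1 := h
        have htake : ((cur ++ [c]) ++ t).take (k + 1) = cur ++ [c] := by
          rw [← hlen]; exact List.take_left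
        have hdrop : ((cur ++ [c]) ++ t).drop (k + 1) = t := by
          rw [← hlen]; exact List.drop_left
        rw [if_neg hne]
        simp only [htake, hdrop, hlen]
        simp
      · -- group not complete yet
        have : (cur ++ [c]).length < k + 1 := by
          simp only [List.length_append, List.length_cons, List.length_nil] at *
          omega
        rw [ih (cur ++ [c]) this]
        simp

-- ===== VERDICT (by name: the statement is the Claim_ definition above) =====
theorem f_spec : Claim_equal_f := by
  intro S K _
  unfold Spec_f f f_alt
  by_cases hK : K ≤ 0
  · rw [fold_noop K hK, if_pos hK]
    have hfin : fFin ([], ([] : List Char) ++ S.toList) = S.toList := by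
      simp only [fFin, List.nil_append]
      split_ifs with h
      · rfl
      · have h0 : S.toList = [] := List.eq_nil_of_length_eq_zero (by omega)
        simp [h0]
    rw [hfin, String.ofList_toList]
  · have hK1 : 1 ≤ K := by omega
    rw [fStep_eq_fStepN K hK1, fold_go (K.toNat - 1) S.toList [] (by simp)]
    simp [hK]
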